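-- pv_equiv track=rewrite | github.com/melcoloy/chapix | core/algorithmes.py | _generer_emplacements
-- ===== SOURCE A (Python) =====
-- def _generer_emplacements(largeur: int, hauteur: int) -> list[tuple]:
--     """Génère la liste des paires de cases (emplacements) pour les algos V2."""
--     occupee = [[False] * largeur for _ in range(hauteur)]
--     emplacements = []
--     for y in range(hauteur):
--         for x in range(largeur):
--             if occupee[y][x]:
--                 continue
--             if x + 1 < largeur and not occupee[y][x + 1]:
--                 emplacements.append(((x, y), (x + 1, y)))
--                 occupee[y][x] = occupee[y][x + 1] = True
--             elif y + 1 < hauteur and not occupee[y + 1][x]: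
--                 emplacements.append(((x, y), (x, y + 1)))
--                 occupee[y][x] = occupee[y + 1][x] = True
--     return emplacements
-- ===== SOURCE B (Python) =====
-- def _generer_emplacements(largeur: int, hauteur: int) -> list[tuple]:
--     """Stateless re-derivation: horizontals per row, plus a vertical in the
--     last column from even rows when the width is odd."""
--     emplacements = []
--     for y in range(hauteur):
--         for x in range(0, largeur - 1, 2):
--             emplacements.append(((x, y), (x + 1, y)))
--         if largeur > 0 and largeur % 2 == 1 and y % 2 == 0 and y + 1 < hauteur:
--             emplacements.append(((largeur - 1, y), (largeur - 1, y + 1)))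
--     return emplacements
-- ===== Notes on version B (the rewrite author's own statement) =====
-- stated objective: simpler
-- what changed: B removes A's mutable occupancy grid entirely: each row's dominoes are emitted directly from a parity formula (horizontal pairs at even columns, plus one vertical in the last column from even rows when the width is odd), keeping no state between cells or rows.
import Mathlib
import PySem

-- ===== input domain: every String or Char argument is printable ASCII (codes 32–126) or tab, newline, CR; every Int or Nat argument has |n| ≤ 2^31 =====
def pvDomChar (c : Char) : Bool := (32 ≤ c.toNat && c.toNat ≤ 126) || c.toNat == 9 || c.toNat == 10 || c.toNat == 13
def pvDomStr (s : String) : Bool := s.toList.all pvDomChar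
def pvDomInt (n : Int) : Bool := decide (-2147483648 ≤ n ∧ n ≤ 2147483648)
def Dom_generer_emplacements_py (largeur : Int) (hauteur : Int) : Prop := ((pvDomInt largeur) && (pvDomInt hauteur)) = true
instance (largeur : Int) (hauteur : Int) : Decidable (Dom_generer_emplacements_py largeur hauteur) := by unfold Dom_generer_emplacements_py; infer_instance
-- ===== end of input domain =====

-- B drops A's mutable occupancy grid: each row's dominoes are emitted directly from a
-- parity formula (horizontals, plus one vertical in the last column from even rows when
-- the width is odd); objective: simpler (no maintained state).

-- ===== PORT A =====
-- occupee[y][x]: indices are always nonnegative and in range during A's scan, so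
-- getD .toNat reads / List.set writes are exact there (Python would raise only out of range).
def pvGridGet (g : List (List Bool)) (y x : Int) : Bool :=
  (g.getD y.toNat []).getD x.toNat false

def pvGridSet (g : List (List Bool)) (y x : Int) (b : Bool) : List (List Bool) :=
  g.modify y.toNat (fun r => r.set x.toNat b)

-- body of A's inner 'for x in range(largeur)' loop, state = (occupee, emplacements)
def pvStepA (largeur hauteur y : Int)
    (st : List (List Bool) × List ((Int × Int) × (Int × Int))) (x : Int) :
    List (List Bool) × List ((Int × Int) × (Int × Int)) :=
  if pvGridGet st.1 y x then st
  else if decide (x + 1 < largeur) && !pvGridGet st.1 y (x + 1) then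
    (pvGridSet (pvGridSet st.1 y x true) y (x + 1) true, st.2 ++ [((x, y), (x + 1, y))])
  else if decide (y + 1 < hauteur) && !pvGridGet st.1 (y + 1) x then
    (pvGridSet (pvGridSet st.1 y x true) (y + 1) x true, st.2 ++ [((x, y), (x, y + 1))])
  else st

-- body of A's outer 'for y in range(hauteur)' loop
def pvRowA (largeur hauteur : Int)
    (st : List (List Bool) × List ((Int × Int) × (Int × Int))) (y : Int) :
    List (List Bool) × List ((Int × Int) × (Int × Int)) :=
  (PySem.List.pyRange 0 largeur 1).foldl (pvStepA largeur hauteur y) st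

def generer_emplacements_py (largeur : Int) (hauteur : Int) : List ((Int × Int) × (Int × Int)) :=
  -- occupee = [[False] * largeur for _ in range(hauteur)]  ([False]*n is empty for n ≤ 0)
  let occupee : List (List Bool) :=
    (PySem.List.pyRange 0 hauteur 1).map (fun _ => List.replicate largeur.toNat false)
  ((PySem.List.pyRange 0 hauteur 1).foldl (pvRowA largeur hauteur) (occupee, [])).2

-- ===== PORT B =====
-- body of B's 'for y in range(hauteur)' loop
def pvRowB (largeur hauteur : Int)
    (emp : List ((Int × Int) × (Int × Int))) (y : Int) : List ((Int × Int) × (Int × Int)) :=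
  let emp2 := (PySem.List.pyRange 0 (largeur - 1) 2).foldl
    (fun acc x => acc ++ [((x, y), (x + 1, y))]) emp
  if decide (largeur > 0) && (PySem.Int.mod largeur 2 == 1) && (PySem.Int.mod y 2 == 0)
      && decide (y + 1 < hauteur)
  then emp2 ++ [((largeur - 1, y), (largeur - 1, y + 1))] else emp2

def generer_emplacements_py_alt (largeur : Int) (hauteur : Int) : List ((Int × Int) × (Int × Int)) :=
  (PySem.List.pyRange 0 hauteur 1).foldl (pvRowB largeur hauteur) []

-- ===== PRECONDITION & SPEC =====
def Spec_generer_emplacements_py (largeur : Int) (hauteur : Int) (out : List ((Int × Int) × (Int × Int))) : Prop := out = generer_emplacements_py_alt largeur hauteur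
instance (largeur : Int) (hauteur : Int) (out : List ((Int × Int) × (Int × Int))) : Decidable (Spec_generer_emplacements_py largeur hauteur out) := by unfold Spec_generer_emplacements_py; infer_instance

-- ===== CLAIM (what is proved, stated in full; the proofs are below) =====
def Claim_equal_generer_emplacements_py : Prop := ∀ (largeur : Int) (hauteur : Int), Dom_generer_emplacements_py largeur hauteur → Spec_generer_emplacements_py largeur hauteur (generer_emplacements_py largeur hauteur)

-- ===== LEMMAS AND PROOFS =====

-- the dominoes one row contributes, as a pure function of (largeur, hauteur, y)
def pvRowOut (W H y : Int) : List ((Int × Int) × (Int × Int)) :=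
  (PySem.List.pyRange 0 (W - 1) 2).map (fun x => ((x, y), (x + 1, y)))
    ++ (if 0 < W ∧ W % 2 = 1 ∧ y % 2 = 0 ∧ y + 1 < H then [((W - 1, y), (W - 1, y + 1))] else [])

-- is the last cell of row y already occupied when A starts scanning row y?
def pvFlag (W y : Int) : Bool := decide (W % 2 = 1) && decide (y % 2 = 1)

def pvShape (W H : Int) (g : List (List Bool)) : Prop :=
  g.length = H.toNat ∧ ∀ (i : Nat) (h : i < g.length), (g[i]).length = W.toNat

def pvRepr (W H : Int) (g : List (List Bool)) (f : Int → Int → Bool) : Prop :=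
  ∀ r x : Int, 0 ≤ r → r < H → 0 ≤ x → x < W → pvGridGet g r x = f r x

-- step-2 ranges
lemma pvRange2_nil {a b : Int} (h : b ≤ a) : PySem.List.pyRange a b 2 = [] := by
  rw [PySem.List.pyRange_of_pos a b (by norm_num)]
  simp [if_neg (by omega : ¬ a < b)]

lemma pvRange2_cons {a b : Int} (h : a < b) :
    PySem.List.pyRange a b 2 = a :: PySem.List.pyRange (a + 2) b 2 := by
  rw [PySem.List.pyRange_of_pos a b (by norm_num), PySem.List.pyRange_of_pos (a+2) b (by norm_num)]
  rw [if_pos h]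
  have hc : ((b - a + 2 - 1) / 2).toNat = (if a + 2 < b then ((b - (a+2) + 2 - 1) / 2).toNat else 0) + 1 := by
    split_ifs with h2 <;> omega
  rw [hc, List.range_succ_eq_map]
  simp only [List.map_map, Function.comp_def, List.map_cons, Nat.cast_zero, mul_zero, add_zero]
  congr 1
  apply List.map_congr_left; intro k _; push_cast; ring

-- grid access lemmas
lemma pvGridSet_getElem? (g : List (List Bool)) (y x : Int) (b : Bool) (j : Nat) :
    (pvGridSet g y x b)[j]? = if y.toNat = j then (g[j]?.map (fun r => r.set x.toNat b)) else g[j]? := by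
  unfold pvGridSet
  rw [List.getElem?_modify]
  split_ifs with h
  · cases g[j]? <;> simp
  · cases g[j]? <;> simp

lemma pvShape_set {W H : Int} {g : List (List Bool)} (hS : pvShape W H g) (y x : Int) (b : Bool) :
    pvShape W H (pvGridSet g y x b) := by
  obtain ⟨h1, h2⟩ := hS
  have hl : (pvGridSet g y x b).length = g.length := List.length_modify ..
  refine ⟨by rw [hl, h1], ?_⟩
  intro i hi
  have hi' : i < g.length := by rwa [hl] at hi
  have h := pvGridSet_getElem? g y x b i
  rw [List.getElem?_eq_getElem hi, List.getElem?_eq_getElem hi'] at h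
  split_ifs at h
  · simp only [Option.map_some, Option.some.injEq] at h
    rw [h, List.length_set]; exact h2 i hi'
  · simp only [Option.some.injEq] at h
    rw [h]; exact h2 i hi'

lemma pvGridGet_set_hit {W H : Int} {g : List (List Bool)} (hS : pvShape W H g)
    {y x : Int} (b : Bool) (hy : 0 ≤ y) (hyH : y < H) (hx : 0 ≤ x) (hxW : x < W) :
    pvGridGet (pvGridSet g y x b) y x = b := by
  obtain ⟨h1, h2⟩ := hS
  have hj : y.toNat < g.length := by omega
  unfold pvGridGet
  rw [List.getD_eq_getElem?_getD (l := pvGridSet g y x b), pvGridSet_getElem?, if_pos rfl,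
      List.getElem?_eq_getElem hj]
  simp only [Option.map_some, Option.getD_some]
  rw [List.getD_eq_getElem?_getD, List.getElem?_set, if_pos rfl,
      if_pos (by rw [h2 y.toNat hj]; omega)]
  rfl

lemma pvGridGet_set_miss (g : List (List Bool)) {y x : Int} (b : Bool) {r c : Int}
    (hy : 0 ≤ y) (hx : 0 ≤ x) (hr : 0 ≤ r) (hc : 0 ≤ c) (hne : ¬(r = y ∧ c = x)) :
    pvGridGet (pvGridSet g y x b) r c = pvGridGet g r c := by
  unfold pvGridGet
  rw [List.getD_eq_getElem?_getD (l := pvGridSet g y x b), List.getD_eq_getElem?_getD (l := g),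
      pvGridSet_getElem?]
  split_ifs with h
  · have hcx : c.toNat ≠ x.toNat := by omega
    cases hg : g[r.toNat]? with
    | none => simp
    | some row =>
        simp only [Option.map_some, Option.getD_some]
        rw [List.getD_eq_getElem?_getD, List.getD_eq_getElem?_getD,
            List.getElem?_set, if_neg (fun hh => hcx hh.symm)]
  · rfl

lemma pvRepr_congr {W H : Int} {g : List (List Bool)} {f f' : Int → Int → Bool}
    (h : pvRepr W H g f) (hff : ∀ r x : Int, 0 ≤ r → r < H → 0 ≤ x → x < W → f r x = f' r x) :
    pvRepr W H g f' := fun r x h1 h2 h3 h4 => (h r x h1 h2 h3 h4).trans (hff r x h1 h2 h3 h4)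

-- the inner scan of one row, characterized from an even start column x0
lemma pvRowA_inner (W H y : Int) (hW : 0 < W) (hy : 0 ≤ y) (hyH : y < H) :
    ∀ (n : Nat) (x0 : Int), (W - x0).toNat = n → 0 ≤ x0 → x0 % 2 = 0 → x0 ≤ W →
    ∀ (g : List (List Bool)) (emp : List ((Int × Int) × (Int × Int))),
    pvShape W H g →
    pvRepr W H g (fun r x => decide (r < y) || (decide (r = y) &&
      (decide (x < x0) || (decide (x = W - 1) && pvFlag W y)))) →
    ∃ g', (PySem.List.pyRange x0 W 1).foldl (pvStepA W H y) (g, emp)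
        = (g', emp ++ ((PySem.List.pyRange x0 (W - 1) 2).map (fun x => ((x, y), (x + 1, y)))
            ++ (if 0 < W ∧ W % 2 = 1 ∧ y % 2 = 0 ∧ y + 1 < H then [((W - 1, y), (W - 1, y + 1))] else [])))
      ∧ pvShape W H g'
      ∧ (y + 1 < H → pvRepr W H g' (fun r x => decide (r < y + 1) ||
          (decide (r = y + 1) && decide (x = W - 1) && pvFlag W (y + 1)))) := by
  intro n
  induction n using Nat.strong_induction_on with
  | _ n IH =>
  intro x0 hn hx0 hpar hle g emp hS hR
  by_cases hxW : x0 < W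
  · by_cases hx1 : x0 + 1 < W
    · -- a full horizontal pair at (x0, x0+1)
      have hg0 : pvGridGet g y x0 = false := by
        rw [hR y x0 hy hyH hx0 hxW]; simp [pvFlag]; omega
      have hg1 : pvGridGet g y (x0 + 1) = false := by
        rw [hR y (x0 + 1) hy hyH (by omega) hx1]; simp [pvFlag]; omega

      have hstep0 : pvStepA W H y (g, emp) x0
          = (pvGridSet (pvGridSet g y x0 true) y (x0 + 1) true, emp ++ [((x0, y), (x0 + 1, y))]) := by
        simp [pvStepA, hg0, hg1, hx1]
      have hS1 : pvShape W H (pvGridSet (pvGridSet g y x0 true) y (x0 + 1) true) :=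
        pvShape_set (pvShape_set hS y x0 true) y (x0 + 1) true
      have hg2 : pvGridGet (pvGridSet (pvGridSet g y x0 true) y (x0 + 1) true) y (x0 + 1) = true :=
        pvGridGet_set_hit (pvShape_set hS y x0 true) true hy hyH (by omega) hx1
      have hstep1 : pvStepA W H y (pvGridSet (pvGridSet g y x0 true) y (x0 + 1) true, emp ++ [((x0, y), (x0 + 1, y))]) (x0 + 1)
          = (pvGridSet (pvGridSet g y x0 true) y (x0 + 1) true, emp ++ [((x0, y), (x0 + 1, y))]) := by
        simp [pvStepA, hg2]
      have hR2 : pvRepr W H (pvGridSet (pvGridSet g y x0 true) y (x0 + 1) true)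
          (fun r x => decide (r < y) || (decide (r = y) &&
            (decide (x < x0 + 2) || (decide (x = W - 1) && pvFlag W y)))) := by
        intro r x h1 h2 h3 h4
        by_cases hcase : r = y ∧ x = x0 + 1
        · rw [hcase.1, hcase.2, hg2]; simp
        · rw [pvGridGet_set_miss _ true hy (by omega) h1 h3 hcase]
          by_cases hcase2 : r = y ∧ x = x0
          · rw [hcase2.1, hcase2.2,
                pvGridGet_set_hit hS true hy hyH hx0 hxW]
            simp
          · rw [pvGridGet_set_miss _ true hy hx0 h1 h3 hcase2,
                hR r x h1 h2 h3 h4]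
            simp only [pvFlag]
            by_cases hry : r = y
            · subst hry
              have hxx0 : x ≠ x0 := fun h => hcase2 ⟨rfl, h⟩
              have hxx1 : x ≠ x0 + 1 := fun h => hcase ⟨rfl, h⟩
              rw [Bool.eq_iff_iff]
              simp
              omega
            · simp [hry]
      obtain ⟨g', hfold, hS', hR'⟩ := IH (W - (x0 + 2)).toNat (by omega) (x0 + 2) rfl
        (by omega) (by omega) (by omega)
        (pvGridSet (pvGridSet g y x0 true) y (x0 + 1) true) (emp ++ [((x0, y), (x0 + 1, y))]) hS1 hR2
      refine ⟨g', ?_, hS', hR'⟩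
      rw [PySem.List.pyRange_one_cons hxW, PySem.List.pyRange_one_cons hx1]
      rw [List.foldl_cons, hstep0, List.foldl_cons, hstep1,
          show x0 + 1 + 1 = x0 + 2 by ring, hfold]
      rw [pvRange2_cons (by omega : x0 < W - 1)]
      simp
    · -- x0 = W - 1 : the last, odd column
      have hx0W : x0 = W - 1 := by omega
      have hWodd : W % 2 = 1 := by omega
      have hrest : PySem.List.pyRange (x0 + 1) W 1 = [] := PySem.List.pyRange_one_eq_nil (by omega)
      have hrange : PySem.List.pyRange x0 W 1 = [x0] := by
        rw [PySem.List.pyRange_one_cons hxW, hrest]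
      have hr2 : PySem.List.pyRange x0 (W - 1) 2 = [] := pvRange2_nil (by omega)
      have hg0 : pvGridGet g y x0 = pvFlag W y := by
        rw [hR y x0 hy hyH hx0 hxW]; simp [hx0W]
      by_cases hflag : pvFlag W y = true
      · -- last cell already taken by the vertical from the previous row
        have hyodd : y % 2 = 1 := by
          simp only [pvFlag, Bool.and_eq_true, decide_eq_true_eq] at hflag; exact hflag.2
        refine ⟨g, ?_, hS, ?_⟩
        · rw [hrange, List.foldl_cons,
              if_neg (by omega : ¬(0 < W ∧ W % 2 = 1 ∧ y % 2 = 0 ∧ y + 1 < H))]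
          simp [pvStepA, hg0, hflag, hr2]
        · intro hH1
          refine pvRepr_congr hR ?_
          intro r x h1 h2 h3 h4
          simp only [pvFlag]
          by_cases hry : r = y
          · subst hry; simp [hWodd, hyodd]; omega
          · by_cases hry1 : r = y + 1
            · subst hry1; simp; omega
            · simp [hry, hry1]; omega
      · -- last cell free
        have hyeven : y % 2 = 0 := by
          simp only [pvFlag, Bool.and_eq_true, decide_eq_true_eq, not_and] at hflag; omega
        have hg0' : pvGridGet g y x0 = false := by rw [hg0]; simpa using hflag
        by_cases hH1 : y + 1 < H
        · -- place the vertical domino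
          have hgd : pvGridGet g (y + 1) x0 = false := by
            rw [hR (y + 1) x0 (by omega) hH1 hx0 hxW]; simp
          have hstep : pvStepA W H y (g, emp) x0
              = (pvGridSet (pvGridSet g y x0 true) (y + 1) x0 true, emp ++ [((x0, y), (x0, y + 1))]) := by
            simp [pvStepA, hg0', hgd, hH1, (by omega : ¬(x0 + 1 < W))]
          refine ⟨pvGridSet (pvGridSet g y x0 true) (y + 1) x0 true, ?_, ?_, ?_⟩
          · rw [hrange, List.foldl_cons, hstep,
                if_pos (⟨by omega, hWodd, hyeven, hH1⟩ :
                  0 < W ∧ W % 2 = 1 ∧ y % 2 = 0 ∧ y + 1 < H)]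
            simp [hx0W]
            exact pvRange2_nil le_rfl
          · exact pvShape_set (pvShape_set hS y x0 true) (y + 1) x0 true
          · intro _ r x h1 h2 h3 h4
            by_cases hcase : r = y + 1 ∧ x = x0
            · rw [hcase.1, hcase.2,
                  pvGridGet_set_hit (pvShape_set hS y x0 true) true (by omega) hH1 hx0 hxW]
              simp [pvFlag, hx0W]; omega
            · rw [pvGridGet_set_miss _ true (by omega) hx0 h1 h3 hcase]
              by_cases hcase2 : r = y ∧ x = x0
              · rw [hcase2.1, hcase2.2, pvGridGet_set_hit hS true hy hyH hx0 hxW]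
                simp
              · rw [pvGridGet_set_miss _ true hy hx0 h1 h3 hcase2,
                    hR r x h1 h2 h3 h4]
                simp only [pvFlag]
                by_cases hry : r = y
                · subst hry; simp [hWodd]; omega
                · by_cases hry1 : r = y + 1
                  · subst hry1; simp [hWodd]; omega
                  · simp [hry, hry1]; omega
        · -- no row below: the corner cell stays unpaired
          have hstep : pvStepA W H y (g, emp) x0 = (g, emp) := by
            simp [pvStepA, hg0', hH1, (by omega : ¬(x0 + 1 < W))]
          refine ⟨g, ?_, hS, fun h => absurd h hH1⟩
          rw [hrange, List.foldl_cons, hstep,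
              if_neg (by omega : ¬(0 < W ∧ W % 2 = 1 ∧ y % 2 = 0 ∧ y + 1 < H))]
          simp [hr2]
  · -- x0 = W : the whole row is consumed (W even)
    have hx0W : x0 = W := by omega
    have hWeven : W % 2 = 0 := by omega
    refine ⟨g, ?_, hS, ?_⟩
    · rw [PySem.List.pyRange_one_eq_nil (by omega), pvRange2_nil (by omega),
          if_neg (by omega : ¬(0 < W ∧ W % 2 = 1 ∧ y % 2 = 0 ∧ y + 1 < H))]
      simp
    · intro hH1
      refine pvRepr_congr hR ?_
      intro r x h1 h2 h3 h4
      simp only [pvFlag]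
      by_cases hry : r = y
      · subst hry; simp; omega
      · by_cases hry1 : r = y + 1
        · subst hry1; simp [hWeven]
        · simp [hry, hry1]; omega

-- the outer scan over rows
lemma pvRowA_outer (W H : Int) (hW : 0 < W) :
    ∀ (n : Nat) (y : Int), (H - y).toNat = n → 0 ≤ y → y ≤ H →
    ∀ (g : List (List Bool)) (emp : List ((Int × Int) × (Int × Int))),
    pvShape W H g →
    (y < H → pvRepr W H g (fun r x => decide (r < y) ||
        (decide (r = y) && decide (x = W - 1) && pvFlag W y))) →
    ((PySem.List.pyRange y H 1).foldl (pvRowA W H) (g, emp)).2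
      = emp ++ (PySem.List.pyRange y H 1).flatMap (pvRowOut W H) := by
  intro n
  induction n using Nat.strong_induction_on with
  | _ n IH =>
  intro y hn hy hyH g emp hS hR
  by_cases hlt : y < H
  · have hR0 : pvRepr W H g (fun r x => decide (r < y) || (decide (r = y) &&
        (decide (x < 0) || (decide (x = W - 1) && pvFlag W y)))) := by
      refine pvRepr_congr (hR hlt) ?_
      intro r x h1 h2 h3 h4
      by_cases hry : r = y
      · subst hry; simp [show ¬ x < (0 : Int) by omega]
      · simp [hry]
    obtain ⟨g', hfold, hS', hR'⟩ := pvRowA_inner W H y hW hy hlt (W - 0).toNat 0 rfl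
      le_rfl (by omega) (by omega) g emp hS hR0
    rw [PySem.List.pyRange_one_cons hlt, List.foldl_cons]
    have hrow : pvRowA W H (g, emp) y = (g', emp ++ ((PySem.List.pyRange 0 (W - 1) 2).map (fun x => ((x, y), (x + 1, y)))
        ++ (if 0 < W ∧ W % 2 = 1 ∧ y % 2 = 0 ∧ y + 1 < H then [((W - 1, y), (W - 1, y + 1))] else []))) := hfold
    rw [hrow, IH (H - (y + 1)).toNat (by omega) (y + 1) rfl (by omega) (by omega) g' _ hS' hR']
    rw [List.flatMap_cons]
    simp [pvRowOut]
  · have hyH' : y = H := by omega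
    rw [PySem.List.pyRange_one_eq_nil (by omega)]
    simp

-- B in closed form
lemma pvRowB_eq (W H : Int) (emp : List ((Int × Int) × (Int × Int))) (y : Int) :
    pvRowB W H emp y = emp ++ pvRowOut W H y := by
  unfold pvRowB pvRowOut
  rw [PySem.List.foldl_append_singleton_eq_map]
  have h2 : PySem.Int.mod W 2 = W % 2 := PySem.Int.mod_eq_emod_of_pos (by norm_num)
  have h2y : PySem.Int.mod y 2 = y % 2 := PySem.Int.mod_eq_emod_of_pos (by norm_num)
  by_cases hc : 0 < W ∧ W % 2 = 1 ∧ y % 2 = 0 ∧ y + 1 < H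
  · rw [if_pos (by simp [hc.1, hc.2.1, hc.2.2.1, hc.2.2.2]), if_pos hc]
    simp
  · rw [if_neg ?_, if_neg hc]
    · simp
    · simp only [h2, h2y, Bool.and_eq_true, decide_eq_true_eq, beq_iff_eq]
      intro h; exact hc ⟨h.1.1.1, h.1.1.2, h.1.2, h.2⟩

lemma pvB_eq (W H : Int) :
    generer_emplacements_py_alt W H = (PySem.List.pyRange 0 H 1).flatMap (pvRowOut W H) := by
  unfold generer_emplacements_py_alt
  have h1 : List.foldl (pvRowB W H) [] (PySem.List.pyRange 0 H 1)
      = List.foldl (fun emp y => emp ++ pvRowOut W H y) [] (PySem.List.pyRange 0 H 1) :=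
    PySem.List.foldl_congr_mem _ _ _ _ (fun acc x _ => pvRowB_eq W H acc x)
  rw [h1, PySem.List.foldl_append_eq_flatMap]
  simp

-- the initial grid
lemma pvGetD_replicate {A : Type} (n : Nat) (a : A) (i : Nat) (d : A) :
    (List.replicate n a).getD i d = if i < n then a else d := by
  rw [List.getD_eq_getElem?_getD, List.getElem?_replicate]
  split_ifs <;> simp

lemma pvInit_get (W H : Int) (r x : Int) :
    pvGridGet ((PySem.List.pyRange 0 H 1).map (fun _ => List.replicate W.toNat false)) r x = false := by
  unfold pvGridGet
  have hmap : (PySem.List.pyRange 0 H 1).map (fun _ => List.replicate W.toNat false)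
      = List.replicate (PySem.List.pyRange 0 H 1).length (List.replicate W.toNat false) :=
    List.map_const' ..
  rw [hmap, pvGetD_replicate]
  split_ifs
  · rw [pvGetD_replicate]
    split_ifs <;> rfl
  · rfl

lemma pvInit_shape (W H : Int) (hH : 0 ≤ H) :
    pvShape W H ((PySem.List.pyRange 0 H 1).map (fun _ => List.replicate W.toNat false)) := by
  constructor
  · rw [List.length_map, PySem.List.length_pyRange_one]; omega
  · intro i hi
    rw [List.getElem_map, List.length_replicate]

-- ===== VERDICT (by name: the statement is the Claim_ definition above) =====
theorem generer_emplacements_py_spec : Claim_equal_generer_emplacements_py := by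
  unfold Claim_equal_generer_emplacements_py Spec_generer_emplacements_py
  intro W H _
  rw [pvB_eq]
  have hdef : generer_emplacements_py W H
      = ((PySem.List.pyRange 0 H 1).foldl (pvRowA W H)
          ((PySem.List.pyRange 0 H 1).map (fun _ => List.replicate W.toNat false), [])).2 := rfl
  rw [hdef]
  by_cases hH : 0 < H
  · by_cases hW : 0 < W
    · have hR0 : 0 < H → pvRepr W H ((PySem.List.pyRange 0 H 1).map (fun _ => List.replicate W.toNat false))
          (fun r x => decide (r < 0) || (decide (r = 0) && decide (x = W - 1) && pvFlag W 0)) := by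
        intro _ r x h1 h2 h3 h4
        rw [pvInit_get]
        simp only [pvFlag]
        by_cases hr : r = 0
        · subst hr; simp
        · simp [hr, show ¬ r < 0 by omega]
      have := pvRowA_outer W H hW (H - 0).toNat 0 rfl le_rfl (by omega)
        ((PySem.List.pyRange 0 H 1).map (fun _ => List.replicate W.toNat false)) []
        (pvInit_shape W H (by omega)) hR0
      simpa using this
    · -- largeur ≤ 0 : A pairs nothing, B emits nothing
      have hrowA : ∀ st y, pvRowA W H st y = st := by
        intro st y
        unfold pvRowA
        rw [PySem.List.pyRange_one_eq_nil (by omega)]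
        rfl
      have hA : List.foldl (pvRowA W H) ((PySem.List.pyRange 0 H 1).map (fun _ => List.replicate W.toNat false), ([] : List ((Int × Int) × (Int × Int)))) (PySem.List.pyRange 0 H 1)
          = ((PySem.List.pyRange 0 H 1).map (fun _ => List.replicate W.toNat false), []) := by
        rw [PySem.List.foldl_congr_mem _ _ (fun st _ => st) _ (fun acc x _ => hrowA acc x),
            PySem.List.foldl_ignore]
      have hB : ∀ y, pvRowOut W H y = [] := by
        intro y
        unfold pvRowOut
        rw [pvRange2_nil (by omega),
            if_neg (by omega : ¬(0 < W ∧ W % 2 = 1 ∧ y % 2 = 0 ∧ y + 1 < H))]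
        simp
      rw [hA]
      simp [List.flatMap, hB]
  · -- hauteur ≤ 0 : no rows at all
    rw [PySem.List.pyRange_one_eq_nil (by omega)]
    rfl
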